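-- pv_equiv track=rewrite | github.com/GR359/midterm_project | midterm_project.py | create_customers_json
-- ===== SOURCE A (Python) =====
-- def create_customers_json(orders):
-- #Creating the customers.json file.
--     customers = {}
--     for order in orders:
--         phone = order['phone']
--         name = order['name']
--         if phone not in customers:
--             customers[phone] = name
--     return customers
-- ===== SOURCE B (Python) =====
-- def create_customers_json(orders):
--     # Two-pass: pair extraction, then a reversed dict so the FIRST name per phone
--     # wins, then a forward dict-comprehension so keys keep first-occurrence order.
--     pairs = [(o['phone'], o['name']) for o in orders]
--     first = dict(reversed(pairs))
--     return {p: first[p] for p, _ in pairs}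
-- ===== Notes on version B (the rewrite author's own statement) =====
-- stated objective: alternative
-- what changed: Replaces the single membership-tested loop by two branch-free dict builds: a reversed dict(pairs) makes the first name per phone win, and a forward dict comprehension restores first-occurrence key order.
-- outside the precondition, e.g. on create_customers_json([{'name': 'a'}]): A raises KeyError, B raises KeyError
import Mathlib
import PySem

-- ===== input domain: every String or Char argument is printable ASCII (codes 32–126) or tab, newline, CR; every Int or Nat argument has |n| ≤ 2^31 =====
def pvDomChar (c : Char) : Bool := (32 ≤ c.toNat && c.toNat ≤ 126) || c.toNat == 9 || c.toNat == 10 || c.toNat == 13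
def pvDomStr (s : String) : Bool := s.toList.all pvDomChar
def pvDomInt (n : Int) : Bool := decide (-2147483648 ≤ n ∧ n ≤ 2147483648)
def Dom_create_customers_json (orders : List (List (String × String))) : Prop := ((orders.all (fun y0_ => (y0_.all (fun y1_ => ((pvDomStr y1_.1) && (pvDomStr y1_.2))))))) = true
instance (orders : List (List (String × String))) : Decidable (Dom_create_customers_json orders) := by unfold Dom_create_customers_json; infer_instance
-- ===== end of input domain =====

-- B rebuilds the same first-name-per-phone dict with two branch-free dict builds
-- (a reversed insert pass + a forward rebuild) instead of A's membership-tested loop.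


-- ===== PORT A =====
-- order['phone'] / order['name'] raise KeyError when the key is missing; those
-- inputs are excluded by Pre_ below, and the port uses .getD "" there.
def create_customers_json (orders : List (List (String × String))) : List (String × String) :=
  (orders.foldl (fun customers order =>
      let phone := ((PySem.Dict.mk order).get? "phone").getD ""
      let name  := ((PySem.Dict.mk order).get? "name").getD ""
      if customers.contains phone then customers
      else customers.insert phone name)
    PySem.Dict.empty).items

-- ===== PORT B =====
def create_customers_json_alt (orders : List (List (String × String))) : List (String × String) :=
  let pairs := orders.map (fun o =>
    (((PySem.Dict.mk o).get? "phone").getD "", ((PySem.Dict.mk o).get? "name").getD ""))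
  let first := pairs.reverse.foldl (fun d pr => d.insert pr.1 pr.2) PySem.Dict.empty
  (pairs.foldl (fun d pr => d.insert pr.1 ((first.get? pr.1).getD "")) PySem.Dict.empty).items

-- ===== PRECONDITION & SPEC =====
-- Pre_ excludes exactly the inputs where A raises KeyError: an order lacking a
-- 'phone' or 'name' key (B raises there too).
def Pre_create_customers_json (orders : List (List (String × String))) : Prop :=
  ∀ o ∈ orders, (PySem.Dict.mk o).contains "phone" = true ∧ (PySem.Dict.mk o).contains "name" = true
instance (orders : List (List (String × String))) : Decidable (Pre_create_customers_json orders) := by unfold Pre_create_customers_json; infer_instance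
def pvWitness_create_customers_json : (List (List (String × String))) :=
  [[("phone", "123"), ("name", "Ann")], [("name", "Bob"), ("phone", "456")], [("phone", "123"), ("name", "Cy")]]
def Spec_create_customers_json (orders : List (List (String × String))) (out : List (String × String)) : Prop := out = create_customers_json_alt orders
instance (orders : List (List (String × String))) (out : List (String × String)) : Decidable (Spec_create_customers_json orders out) := by unfold Spec_create_customers_json; infer_instance

-- ===== CLAIM (what is proved, stated in full; the proofs are below) =====
def Claim_equal_create_customers_json : Prop := ∀ (orders : List (List (String × String))), Dom_create_customers_json orders → Pre_create_customers_json orders → Spec_create_customers_json orders (create_customers_json orders)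

-- ===== LEMMAS AND PROOFS =====

lemma get?_mk_nil (p : String) : (PySem.Dict.mk ([] : List (String × String))).get? p = none := rfl

-- first match over a concatenated literal dict splits into an Option.or
lemma get?_mk_append (xs ys : List (String × String)) (p : String) :
    (PySem.Dict.mk (xs ++ ys)).get? p
      = ((PySem.Dict.mk xs).get? p).or ((PySem.Dict.mk ys).get? p) := by
  induction xs with
  | nil => simp [get?_mk_nil]
  | cons q tl ih =>
      rcases q with ⟨k, v⟩
      by_cases hk : k = p
      · simp [PySem.Dict.get?_mk_cons, hk]
      · simpa [PySem.Dict.get?_mk_cons, hk] using ih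

-- lookup after a plain insert-fold = last value for that key (first in the reversed list)
lemma get?_foldl_insert (l : List (String × String)) (d : PySem.Dict String String) (p : String) :
    (l.foldl (fun d pr => d.insert pr.1 pr.2) d).get? p
      = ((PySem.Dict.mk l.reverse).get? p).or (d.get? p) := by
  induction l generalizing d with
  | nil => simp [get?_mk_nil]
  | cons q tl ih =>
      rcases q with ⟨k, v⟩
      rw [List.foldl_cons, ih, List.reverse_cons, get?_mk_append]
      by_cases hk : p = k
      · subst hk
        cases h : (PySem.Dict.mk tl.reverse).get? p <;>
          simp [h, PySem.Dict.get?_mk_cons, PySem.Dict.get?_insert_self]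
      · cases h : (PySem.Dict.mk tl.reverse).get? p <;>
          simp [h, PySem.Dict.get?_mk_cons, Ne.symm hk, get?_mk_nil,
                PySem.Dict.get?_insert_of_ne _ _ hk]

-- inserting the value a key already has is the identity (on Nodup keys)
lemma insert_same (d : PySem.Dict String String) (k v : String)
    (hnd : d.keys.Nodup) (h : d.get? k = some v) : d.insert k v = d := by
  have hc : d.contains k = true := by
    rw [PySem.Dict.contains_eq_isSome_get?, h]; rfl
  apply PySem.Dict.ext
  rw [PySem.Dict.items_insert_of_contains d v hc]
  have hcong : ∀ pr ∈ d.items, (if pr.1 == k then (k, v) else pr) = pr := by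
    intro pr hpr
    rcases pr with ⟨a, b⟩
    by_cases hk : a = k
    · subst hk
      have hab := PySem.Dict.get?_of_mem_items d hpr hnd
      rw [h] at hab
      simp_all
    · simp [hk]
  rw [List.map_congr_left hcong, List.map_id']

-- core invariant: A's guarded loop = B's unconditional rebuild, given that every
-- value already stored and every first-match value still to come agrees with f
lemma main_loop (f : String → String) :
    ∀ (rest : List (String × String)) (d : PySem.Dict String String),
    d.keys.Nodup →
    (∀ p v, d.get? p = some v → v = f p) →
    (∀ p n, d.get? p = none → (PySem.Dict.mk rest).get? p = some n → n = f p) →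
    rest.foldl (fun c pr => if c.contains pr.1 then c else c.insert pr.1 pr.2) d
      = rest.foldl (fun c pr => c.insert pr.1 (f pr.1)) d := by
  intro rest
  induction rest with
  | nil => intro d _ _ _; rfl
  | cons q tl ih =>
      rcases q with ⟨p, n⟩
      intro d hnd hd hrest
      rw [List.foldl_cons, List.foldl_cons]
      by_cases hc : d.contains p = true
      · obtain ⟨v, hv⟩ : ∃ v, d.get? p = some v := by
          rw [PySem.Dict.contains_eq_isSome_get?] at hc
          exact Option.isSome_iff_exists.mp hc
        have hvf := hd p v hv
        rw [hc, if_pos rfl, insert_same d p (f p) hnd (hvf ▸ hv)]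
        refine ih d hnd hd ?_
        intro q m hq hm
        have hqp : q ≠ p := by intro h; rw [h, hv] at hq; simp at hq
        refine hrest q m hq ?_
        rw [PySem.Dict.get?_mk_cons]
        simp [Ne.symm hqp, hm]
      · have hp : d.get? p = none := by
          rw [PySem.Dict.contains_eq_isSome_get?] at hc
          exact Option.not_isSome_iff_eq_none.mp (by simpa using hc)
        have hnf : n = f p := hrest p n hp (by simp [PySem.Dict.get?_mk_cons])
        rw [if_neg (by simp [hc]), hnf]
        refine ih (d.insert p (f p)) (PySem.Dict.nodup_keys_insert d p (f p) hnd) ?_ ?_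
        · intro q v hq
          by_cases hqp : q = p
          · subst hqp
            rw [PySem.Dict.get?_insert_self] at hq
            exact Option.some_inj.mp hq.symm
          · exact hd q v (by rwa [PySem.Dict.get?_insert_of_ne _ _ hqp] at hq)
        · intro q m hq hm
          have hqp : q ≠ p := by
            intro h; rw [h, PySem.Dict.get?_insert_self] at hq; simp at hq
          rw [PySem.Dict.get?_insert_of_ne _ _ hqp] at hq
          refine hrest q m hq ?_
          rw [PySem.Dict.get?_mk_cons]
          simp [Ne.symm hqp, hm]

-- ===== VERDICT (by name: the statement is the Claim_ definition above) =====
theorem create_customers_json_spec : Claim_equal_create_customers_json := by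
  intro orders _ _
  unfold Spec_create_customers_json create_customers_json create_customers_json_alt
  set pairs := orders.map (fun o =>
    (((PySem.Dict.mk o).get? "phone").getD "", ((PySem.Dict.mk o).get? "name").getD "")) with hpairs
  set first := pairs.reverse.foldl (fun d pr => d.insert pr.1 pr.2) PySem.Dict.empty with hfirst
  have hfget : ∀ p, first.get? p = (PySem.Dict.mk pairs).get? p := by
    intro p
    rw [hfirst, get?_foldl_insert, List.reverse_reverse]
    cases h : (PySem.Dict.mk pairs).get? p <;> simp [h, PySem.Dict.get?_empty]
  have hA : orders.foldl (fun customers order =>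
      let phone := ((PySem.Dict.mk order).get? "phone").getD ""
      let name  := ((PySem.Dict.mk order).get? "name").getD ""
      if customers.contains phone then customers
      else customers.insert phone name) PySem.Dict.empty
    = pairs.foldl (fun c pr => if c.contains pr.1 then c else c.insert pr.1 pr.2)
        PySem.Dict.empty := by
    rw [hpairs, List.foldl_map]
  rw [hA, main_loop (fun p => (first.get? p).getD "") pairs PySem.Dict.empty
        (by simp [PySem.Dict.empty, PySem.Dict.keys])
        (by intro p v h; rw [PySem.Dict.get?_empty] at h; simp at h)
        (by intro p n _ hn
            show n = (first.get? p).getD ""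
            rw [hfget p, hn]
            rfl)]
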